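-- pv_equiv track=rewrite | github.com/emilia-c/cbam-thesis | cbam_meeting_information/code/mep_information/term 10/10term_meps_extraction.py | construct_mep_url
-- ===== SOURCE A (Python) =====
-- def construct_mep_url(mep_name, mep_id):
--     names = mep_name.split()
--     first_names = []
--     last_names = []
--
--     for name in names:
--         if name.isupper():
--             last_names.append(name)
--         else:
--             first_names.append(name)
--
--     first_name_part = '+'.join(first_names)
--     last_name_part = '+'.join(last_names)
--
--     if last_names:
--         if first_names:
--             return f"https://www.europarl.europa.eu/meps/en/{mep_id}/{first_name_part}+{last_name_part}/home"
--         else: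
--             return f"https://www.europarl.europa.eu/meps/en/{mep_id}/{last_name_part}/home"
--     else:
--         return f"https://www.europarl.europa.eu/meps/en/{mep_id}/{first_name_part}/home"
-- ===== SOURCE B (Python) =====
-- def construct_mep_url(mep_name, mep_id):
--     # Stable sort: non-uppercase tokens keep order and come first, uppercase tokens last.
--     ordered = sorted(mep_name.split(), key=str.isupper)
--     return f"https://www.europarl.europa.eu/meps/en/{mep_id}/{'+'.join(ordered)}/home"
-- ===== Notes on version B (the rewrite author's own statement) =====
-- stated objective: idiomatic
-- what changed: Replaced the explicit two-list partition loop and three-way branch with a single stable sort by the boolean key str.isupper and one format expression; stability makes non-upper tokens keep their order and precede upper ones, reproducing all grouping and empty-group cases.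
import Mathlib
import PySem

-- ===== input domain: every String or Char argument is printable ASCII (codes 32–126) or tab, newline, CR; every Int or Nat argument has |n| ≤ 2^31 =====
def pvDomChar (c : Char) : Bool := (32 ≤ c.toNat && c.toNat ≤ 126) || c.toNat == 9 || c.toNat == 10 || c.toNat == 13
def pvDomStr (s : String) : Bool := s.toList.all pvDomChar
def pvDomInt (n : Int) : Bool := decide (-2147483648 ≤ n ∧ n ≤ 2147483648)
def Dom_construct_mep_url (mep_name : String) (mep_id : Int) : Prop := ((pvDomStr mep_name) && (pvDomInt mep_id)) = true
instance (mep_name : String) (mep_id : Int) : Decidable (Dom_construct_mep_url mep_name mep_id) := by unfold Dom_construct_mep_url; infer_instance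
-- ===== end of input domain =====

-- B replaces A's two-list partition loop and three-way branch with one stable sort by the
-- boolean key str.isupper followed by a single format expression (objective: idiomatic).

-- ===== PORT A =====
-- hand port of Python str.isupper for the (ASCII) domain: at least one cased character and
-- no lowercase one; exact on printable-ASCII strings, where the cased characters are letters
def pyStrIsupper (s : String) : Bool :=
  s.toList.any PySem.Chars.isupper && !(s.toList.any PySem.Chars.islower)

def construct_mep_url (mep_name : String) (mep_id : Int) : String :=
  let names := PySem.Str.split₀ mep_name
  let p := names.foldl
    (fun (acc : List String × List String) name =>
      if pyStrIsupper name then (acc.1, acc.2 ++ [name]) else (acc.1 ++ [name], acc.2))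
    ([], [])
  let first_name_part := PySem.Str.join "+" p.1
  let last_name_part := PySem.Str.join "+" p.2
  if p.2 ≠ [] then
    if p.1 ≠ [] then
      "https://www.europarl.europa.eu/meps/en/" ++ PySem.Int.toStr mep_id ++ "/" ++
        first_name_part ++ "+" ++ last_name_part ++ "/home"
    else
      "https://www.europarl.europa.eu/meps/en/" ++ PySem.Int.toStr mep_id ++ "/" ++
        last_name_part ++ "/home"
  else
    "https://www.europarl.europa.eu/meps/en/" ++ PySem.Int.toStr mep_id ++ "/" ++
      first_name_part ++ "/home"

-- ===== PORT B =====
-- the boolean sort key False < True is ported as the Nat key 0 < 1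
def construct_mep_url_alt (mep_name : String) (mep_id : Int) : String :=
  let ordered := PySem.List.sorted (PySem.Str.split₀ mep_name)
    (fun n => if pyStrIsupper n then (1 : Nat) else 0)
  "https://www.europarl.europa.eu/meps/en/" ++ PySem.Int.toStr mep_id ++ "/" ++
    PySem.Str.join "+" ordered ++ "/home"

-- ===== PRECONDITION & SPEC =====
def Spec_construct_mep_url (mep_name : String) (mep_id : Int) (out : String) : Prop := out = construct_mep_url_alt mep_name mep_id
instance (mep_name : String) (mep_id : Int) (out : String) : Decidable (Spec_construct_mep_url mep_name mep_id out) := by unfold Spec_construct_mep_url; infer_instance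

-- ===== CLAIM (what is proved, stated in full; the proofs are below) =====
def Claim_equal_construct_mep_url : Prop := ∀ (mep_name : String) (mep_id : Int), Dom_construct_mep_url mep_name mep_id → Spec_construct_mep_url mep_name mep_id (construct_mep_url mep_name mep_id)

-- ===== LEMMAS AND PROOFS =====

-- A's partition loop computes the two filters
theorem pv_foldl_partition (names : List String) (f0 l0 : List String) :
    names.foldl
      (fun (acc : List String × List String) name =>
        if pyStrIsupper name then (acc.1, acc.2 ++ [name]) else (acc.1 ++ [name], acc.2))
      (f0, l0)
    = (f0 ++ names.filter (fun n => !pyStrIsupper n), l0 ++ names.filter pyStrIsupper) := by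
  induction names generalizing f0 l0 with
  | nil => simp
  | cons n ns ih =>
    by_cases h : pyStrIsupper n = true
    · simp [h, ih]
    · simp [List.foldl_cons, h, ih]

-- inserting a key-0 element into (zeros ++ ones) puts it at the end of the zero block
theorem pv_insertBy_mid (before : String → String → Bool) (x : String)
    (zs os : List String)
    (hz : ∀ z ∈ zs, before x z = false) (ho : ∀ o ∈ os, before x o = true) :
    PySem.List.insertBy before x (zs ++ os) = zs ++ x :: os := by
  induction zs with
  | nil =>
    cases os with
    | nil => simp [PySem.List.insertBy]
    | cons o os' => simp [PySem.List.insertBy, ho o (by simp)]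
  | cons z zs' ih =>
    simp [PySem.List.insertBy, hz z (by simp)]
    exact ih (fun z hzm => hz z (by simp [hzm]))

-- the stable insertion sort with a 0/1 key produces  filter-0 ++ filter-1
theorem pv_sorted_partition_aux (names zs os : List String)
    (hz : ∀ z ∈ zs, pyStrIsupper z = false) (ho : ∀ o ∈ os, pyStrIsupper o = true) :
    names.foldl
      (fun acc x => PySem.List.insertBy
        (fun a b => decide ((if pyStrIsupper a then (1 : Nat) else 0) < (if pyStrIsupper b then (1 : Nat) else 0))) x acc)
      (zs ++ os)
    = (zs ++ names.filter (fun n => !pyStrIsupper n)) ++ (os ++ names.filter pyStrIsupper) := by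
  induction names generalizing zs os with
  | nil => simp
  | cons n ns ih =>
    by_cases h : pyStrIsupper n = true
    · rw [List.foldl_cons,
        PySem.List.insertBy_of_forall_not_before _ _ _
          (by intro y _; by_cases hy : pyStrIsupper y = true <;> simp [h, hy]),
        List.append_assoc zs os [n], ← List.append_assoc zs os [n]]
      rw [show zs ++ os ++ [n] = zs ++ (os ++ [n]) by simp]
      rw [ih zs (os ++ [n]) hz (by intro o hom; rcases List.mem_append.mp hom with h1 | h1
                                   · exact ho o h1
                                   · simp at h1; simp [h1, h])]
      simp [h]
    · rw [List.foldl_cons,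
        pv_insertBy_mid _ n zs os
          (by intro z hzm; simp [h, hz z hzm])
          (by intro o hom; simp [h, ho o hom])]
      rw [show zs ++ n :: os = (zs ++ [n]) ++ os by simp]
      rw [ih (zs ++ [n]) os
          (by intro z hzm; rcases List.mem_append.mp hzm with h1 | h1
              · exact hz z h1
              · simp at h1; simp [h1, h])
          ho]
      simp [h]

theorem pv_sorted_partition (names : List String) :
    PySem.List.sorted names (fun n => if pyStrIsupper n then (1 : Nat) else 0) false
      = names.filter (fun n => !pyStrIsupper n) ++ names.filter pyStrIsupper := by
  have := pv_sorted_partition_aux names [] [] (by simp) (by simp)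
  simpa [PySem.List.sorted] using this

-- '+'.join over an append of two nonempty lists
theorem pv_join_append (f l : List String) (hf : f ≠ []) (hl : l ≠ []) :
    PySem.Str.join "+" (f ++ l) = PySem.Str.join "+" f ++ "+" ++ PySem.Str.join "+" l := by
  apply String.toList_inj.mp
  simp [PySem.Str.join, PySem.Chars.join, String.append_assoc]
  induction f with
  | nil => exact absurd rfl hf
  | cons a f' ih =>
    cases f' with
    | nil =>
      cases l with
      | nil => exact absurd rfl hl
      | cons b l' => simp [List.intercalate]
    | cons a' f'' =>
      have h2 := ih (by simp)
      have step : ∀ (b : List Char) (rest : List (List Char)),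
          List.intercalate ['+'] (a.toList :: b :: rest)
            = a.toList ++ ['+'] ++ List.intercalate ['+'] (b :: rest) := by
        intro b rest; simp [List.intercalate, List.intersperse]
      simp only [List.cons_append, List.map_cons] at *
      rw [step, step, h2]
      simp

-- ===== VERDICT (by name: the statement is the Claim_ definition above) =====
theorem construct_mep_url_spec : Claim_equal_construct_mep_url := by
  intro mep_name mep_id _
  unfold Spec_construct_mep_url construct_mep_url construct_mep_url_alt
  simp only [pv_foldl_partition, pv_sorted_partition, List.nil_append]
  set names := PySem.Str.split₀ mep_name with hnames
  set f := names.filter (fun n => !pyStrIsupper n) with hf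
  set l := names.filter pyStrIsupper with hl
  by_cases hlc : l = []
  · simp [hlc]
  · by_cases hfc : f = []
    · simp [hlc, hfc]
    · simp only [hlc, hfc, ne_eq, not_false_iff, if_true]
      rw [pv_join_append f l hfc hlc]
      simp [String.append_assoc]
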